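-- pv_equiv track=rewrite | github.com/AlessandroBudroni/Two-Is-All-It-Takes | section3/ssp.py | subset_sum_dp_longest
-- ===== SOURCE A (Python) =====
-- def subset_sum_dp_longest(nums, target, no_single_solution=False):
--
--     if no_single_solution:
--         nums = [n for n in nums if n < target]
--
--     n = len(nums)
--     max_target = target + 20
--
--     # dp[i][t] = max number of elements to reach t using first i items, or -inf if impossible
--     dp = [[-10**9] * (max_target) for _ in range(n + 1)]
--     dp[0][0] = 0
--
--     for i in range(1, n + 1):
--         for t in range(max_target):
--             # option 1: don't take nums[i-1]
--             dp[i][t] = max(dp[i][t], dp[i-1][t])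
--             # option 2: take nums[i-1]
--             if t >= nums[i-1] and dp[i-1][t - nums[i-1]] >= 0:
--                 dp[i][t] = max(dp[i][t], dp[i-1][t - nums[i-1]] + 1)
--
--     # find the closest achievable sum
--     for offset in range(max_target):
--         lower = target - offset
--         upper = target + offset
--         if lower >= 0 and dp[n][lower] >= 0:
--             closest = lower
--             break
--         if upper < max_target and dp[n][upper] >= 0:
--             closest = upper
--             break
--     else:
--         return None, []
--
--     # backtrack to recover subset
--     subset = []
--     i, t = n, closest
--     while i > 0 and t >= 0:
--         if t >= nums[i-1] and dp[i][t] == dp[i-1][t - nums[i-1]] + 1: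
--             subset.append(nums[i-1])
--             t -= nums[i-1]
--         i -= 1
--
--     return closest, subset[::-1]
-- ===== SOURCE B (Python) =====
-- def subset_sum_dp_longest(nums, target, no_single_solution=False):
--
--     if no_single_solution:
--         nums = [n for n in nums if n < target]
--
--     max_target = target + 20
--
--     # best[s] = longest subset (ties: prefer taking later items) reaching sum s,
--     # stored in ascending item order; replaces the count table + backtracking.
--     best = {0: []}
--     for a in nums:
--         new = dict(best)
--         for s, sub in best.items():
--             t = s + a
--             if 0 <= t < max_target:
--                 cur = new.get(t)
--                 if cur is None or len(sub) + 1 >= len(cur):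
--                     new[t] = sub + [a]
--         best = new
--
--     for offset in range(max_target):
--         lower = target - offset
--         upper = target + offset
--         if lower >= 0 and lower in best:
--             return lower, best[lower]
--         if upper < max_target and upper in best:
--             return upper, best[upper]
--     return None, []
-- ===== Notes on version B (the rewrite author's own statement) =====
-- stated objective: simpler
-- what changed: Replaces the (n+1) x max_target count table plus separate backtracking pass with a single forward DP over a dict mapping each reachable sum to its best subset (ties overwritten so later items win, reproducing A's backtracking preference), so the subset is ready the moment the offset search picks a sum; the dict holds only reachable sums where A fills the whole table.
-- outside the precondition, e.g. on subset_sum_dp_longest([18], -1, False): A returns (-1, []), B returns (0, []); on subset_sum_dp_longest([-5], -10, True): A returns (-10, []), B returns (None, [])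
import Mathlib
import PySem

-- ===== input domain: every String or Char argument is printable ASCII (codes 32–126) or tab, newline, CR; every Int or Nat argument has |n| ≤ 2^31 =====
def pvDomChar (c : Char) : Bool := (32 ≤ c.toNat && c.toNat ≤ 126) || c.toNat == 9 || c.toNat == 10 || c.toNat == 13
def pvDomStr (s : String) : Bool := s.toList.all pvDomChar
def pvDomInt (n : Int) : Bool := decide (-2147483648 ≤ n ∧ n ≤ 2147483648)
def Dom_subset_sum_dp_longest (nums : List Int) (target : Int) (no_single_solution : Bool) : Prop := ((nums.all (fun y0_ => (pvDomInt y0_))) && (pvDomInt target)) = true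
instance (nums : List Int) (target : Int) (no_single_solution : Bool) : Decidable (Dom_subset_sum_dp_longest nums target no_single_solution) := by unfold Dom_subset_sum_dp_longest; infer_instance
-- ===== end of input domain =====

-- B replaces A's 2D count table + backtracking pass with a single forward DP dict mapping each
-- reachable sum to its best subset, so no backtracking is needed (a simpler decomposition;
-- the dict holds only reachable sums where A fills the whole (n+1) x max_target table).

-- ===== PORT A =====
-- dp rows are encoded as total functions Int → Int (entry -10^9 outside [0, max_target), exactly
-- the table's fill value); under Pre_ every Python access is in range, so this is exact there.
def pvA_row0 : Int → Int := fun t => if t = 0 then 0 else -1000000000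

def pvA_step (maxT : Int) (prev : Int → Int) (a : Int) : Int → Int :=
  fun t =>
    if 0 ≤ t ∧ t < maxT then
      if a ≤ t ∧ 0 ≤ prev (t - a) then
        max (max (-1000000000) (prev t)) (prev (t - a) + 1)
      else max (-1000000000) (prev t)
    else -1000000000

def pvA_dp (maxT : Int) (nums : List Int) : Nat → Int → Int
  | 0 => pvA_row0
  | i + 1 => pvA_step maxT (pvA_dp maxT nums i) (nums.getD i 0)

def pvA_search (maxT target : Int) (dpn : Int → Int) : Nat → Int → Option Int
  | 0, _ => none
  | fuel + 1, offset =>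
    if 0 ≤ target - offset ∧ 0 ≤ dpn (target - offset) then some (target - offset)
    else if target + offset < maxT ∧ 0 ≤ dpn (target + offset) then some (target + offset)
    else pvA_search maxT target dpn fuel (offset + 1)

def pvA_back (maxT : Int) (nums : List Int) : Nat → Int → List Int
  | 0, _ => []
  | i + 1, t =>
    if t < 0 then []
    else if nums.getD i 0 ≤ t ∧
        pvA_dp maxT nums (i + 1) t = pvA_dp maxT nums i (t - nums.getD i 0) + 1 then
      pvA_back maxT nums i (t - nums.getD i 0) ++ [nums.getD i 0]
    else pvA_back maxT nums i t

def subset_sum_dp_longest (nums : List Int) (target : Int) (no_single_solution : Bool) : Option Int × List Int :=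
  let nums' := if no_single_solution then nums.filter (fun n => n < target) else nums
  let maxT := target + 20
  match pvA_search maxT target (pvA_dp maxT nums' nums'.length) maxT.toNat 0 with
  | none => (none, [])
  | some closest => (some closest, pvA_back maxT nums' nums'.length closest)

-- ===== PORT B =====
def pvB_upd (maxT a : Int) (d : PySem.Dict Int (List Int)) (p : Int × List Int) : PySem.Dict Int (List Int) :=
  if 0 ≤ p.1 + a ∧ p.1 + a < maxT then
    match d.get? (p.1 + a) with
    | none => d.insert (p.1 + a) (p.2 ++ [a])
    | some cur => if cur.length ≤ p.2.length + 1 then d.insert (p.1 + a) (p.2 ++ [a]) else d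
  else d

def pvB_best (maxT : Int) (nums : List Int) : PySem.Dict Int (List Int) :=
  nums.foldl (fun best a => best.items.foldl (pvB_upd maxT a) best) (PySem.Dict.empty.insert 0 [])

def pvB_search (maxT target : Int) (best : PySem.Dict Int (List Int)) : Nat → Int → Option Int × List Int
  | 0, _ => (none, [])
  | fuel + 1, offset =>
    match (if 0 ≤ target - offset then best.get? (target - offset) else none) with
    | some sub => (some (target - offset), sub)
    | none =>
      match (if target + offset < maxT then best.get? (target + offset) else none) with
      | some sub => (some (target + offset), sub)
      | none => pvB_search maxT target best fuel (offset + 1)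

def subset_sum_dp_longest_alt (nums : List Int) (target : Int) (no_single_solution : Bool) : Option Int × List Int :=
  let nums' := if no_single_solution then nums.filter (fun n => n < target) else nums
  let maxT := target + 20
  pvB_search maxT target (pvB_best maxT nums') maxT.toNat 0

-- ===== PRECONDITION & SPEC =====
-- Pre_ excludes inputs where Python A raises IndexError (a negative element of the effective list,
-- or target ≤ -20), and negative targets in (-20, 0), where A's offset search reads the dp row
-- through Python negative-index wraparound and can return a negative 'closest' — an artefact.
def Pre_subset_sum_dp_longest (nums : List Int) (target : Int) (no_single_solution : Bool) : Prop :=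
  0 ≤ target ∧ ∀ n ∈ nums, 0 ≤ n
instance (nums : List Int) (target : Int) (no_single_solution : Bool) : Decidable (Pre_subset_sum_dp_longest nums target no_single_solution) := by unfold Pre_subset_sum_dp_longest; infer_instance

def pvWitness_subset_sum_dp_longest : List Int × Int × Bool := ([1, 2, 7], 9, false)

def Spec_subset_sum_dp_longest (nums : List Int) (target : Int) (no_single_solution : Bool) (out : Option Int × List Int) : Prop := out = subset_sum_dp_longest_alt nums target no_single_solution
instance (nums : List Int) (target : Int) (no_single_solution : Bool) (out : Option Int × List Int) : Decidable (Spec_subset_sum_dp_longest nums target no_single_solution out) := by unfold Spec_subset_sum_dp_longest; infer_instance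

-- ===== CLAIM (what is proved, stated in full; the proofs are below) =====
def Claim_equal_subset_sum_dp_longest : Prop := ∀ (nums : List Int) (target : Int) (no_single_solution : Bool), Dom_subset_sum_dp_longest nums target no_single_solution → Pre_subset_sum_dp_longest nums target no_single_solution → Spec_subset_sum_dp_longest nums target no_single_solution (subset_sum_dp_longest nums target no_single_solution)

-- ===== LEMMAS AND PROOFS =====

-- dp values are either the fill value -10^9 or a nonnegative count
theorem pvA_dp_cases (maxT : Int) (nums : List Int) (i : Nat) (t : Int) :
    pvA_dp maxT nums i t = -1000000000 ∨ 0 ≤ pvA_dp maxT nums i t := by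
  induction i generalizing t with
  | zero => simp only [pvA_dp, pvA_row0]; split_ifs <;> omega
  | succ i ih =>
    simp only [pvA_dp, pvA_step]
    split_ifs with h1 h2
    · rcases ih t with h | h <;> rcases ih (t - nums.getD i 0) with h' | h' <;> omega
    · rcases ih t with h | h <;> omega
    · omega

-- a nonnegative dp entry lies in the table's index range
theorem pvA_dp_nonneg_range (maxT : Int) (h0 : 0 < maxT) (nums : List Int) (i : Nat) (t : Int)
    (h : 0 ≤ pvA_dp maxT nums i t) : 0 ≤ t ∧ t < maxT := by
  cases i with
  | zero =>
    simp only [pvA_dp, pvA_row0] at h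
    split_ifs at h with h1
    · omega
    · omega
  | succ i =>
    simp only [pvA_dp, pvA_step] at h
    split_ifs at h with h1 h2
    · exact h1
    · exact h1
    · omega

-- the backtracked subset has length = dp count
theorem pvA_back_length (maxT : Int) (nums : List Int) (i : Nat) (t : Int)
    (h : 0 ≤ pvA_dp maxT nums i t) :
    ((pvA_back maxT nums i t).length : Int) = pvA_dp maxT nums i t := by
  induction i generalizing t with
  | zero =>
    simp only [pvA_dp, pvA_row0] at h ⊢
    simp only [pvA_back]
    split_ifs at h ⊢ with h1
    · simp
    · omega
  | succ i ih =>
    have hd := pvA_dp_cases maxT nums i t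
    have hd' := pvA_dp_cases maxT nums i (t - nums.getD i 0)
    have hstep : pvA_dp maxT nums (i+1) t =
        pvA_step maxT (pvA_dp maxT nums i) (nums.getD i 0) t := rfl
    have hrange : ¬ t < 0 := by
      have := pvA_dp_nonneg_range maxT (by
        by_contra hmt
        -- if maxT ≤ 0 every step value is the fill value, contradicting h
        rw [hstep] at h; simp only [pvA_step] at h
        split_ifs at h with h1 <;> omega) nums (i+1) t h
      omega
    simp only [pvA_back, hrange, if_false]
    by_cases hc : nums.getD i 0 ≤ t ∧
        pvA_dp maxT nums (i+1) t = pvA_dp maxT nums i (t - nums.getD i 0) + 1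
    · rw [if_pos hc]
      have hnn : 0 ≤ pvA_dp maxT nums i (t - nums.getD i 0) := by omega
      have := ih (t - nums.getD i 0) hnn
      simp only [List.length_append, List.length_cons, List.length_nil]
      push_cast
      omega
    · rw [if_neg hc]
      -- not taking: the step value equals the previous row's value
      have heq : pvA_dp maxT nums (i+1) t = pvA_dp maxT nums i t := by
        rw [hstep] at h hc ⊢
        simp only [pvA_step] at h hc ⊢
        split_ifs at h hc ⊢ with h1 h2
        · -- take branch available but the take condition failed: the kept value wins
          omega
        · omega
        · omega
      rw [heq]
      exact ih t (by omega)

-- a single update only touches key p.1 + a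
theorem pvB_upd_get?_ne (maxT a : Int) (d : PySem.Dict Int (List Int)) (p : Int × List Int)
    (t : Int) (h : p.1 + a ≠ t) : (pvB_upd maxT a d p).get? t = d.get? t := by
  simp only [pvB_upd]
  split_ifs with h1
  · cases hg : d.get? (p.1 + a) with
    | none => exact PySem.Dict.get?_insert_of_ne _ _ (Ne.symm h)
    | some cur =>
      dsimp only
      split_ifs
      · exact PySem.Dict.get?_insert_of_ne _ _ (Ne.symm h)
      · rfl
  · rfl

-- the fold only touches keys p.1 + a
theorem pvB_foldl_get?_untouched (maxT a : Int) (l : List (Int × List Int))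
    (d : PySem.Dict Int (List Int)) (t : Int) (h : ∀ q ∈ l, q.1 + a ≠ t) :
    (l.foldl (pvB_upd maxT a) d).get? t = d.get? t := by
  induction l generalizing d with
  | nil => rfl
  | cons p l ih =>
    rw [List.foldl_cons, ih _ (fun q hq => h q (List.mem_cons_of_mem _ hq)),
      pvB_upd_get?_ne maxT a d p t (h p (List.mem_cons_self))]

-- characterisation of one inner fold step of B
theorem pvB_foldl_get? (maxT a : Int) (l : List (Int × List Int))
    (d : PySem.Dict Int (List Int)) (t : Int) (hnd : (l.map (fun p => p.1 + a)).Nodup) :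
    (l.foldl (pvB_upd maxT a) d).get? t =
      match l.find? (fun p => p.1 + a == t) with
      | none => d.get? t
      | some p =>
        if 0 ≤ t ∧ t < maxT then
          match d.get? t with
          | none => some (p.2 ++ [a])
          | some cur => if cur.length ≤ p.2.length + 1 then some (p.2 ++ [a]) else some cur
        else d.get? t := by
  induction l generalizing d with
  | nil => simp [List.find?]
  | cons p l ih =>
    rw [List.map_cons, List.nodup_cons] at hnd
    obtain ⟨hnotin, hnd'⟩ := hnd
    by_cases hp : p.1 + a = t
    · have hfind : (p :: l).find? (fun q => q.1 + a == t) = some p := by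
        simp [List.find?, hp]
      rw [hfind, List.foldl_cons,
        pvB_foldl_get?_untouched maxT a l (pvB_upd maxT a d p) t
          (by
            intro q hq hqt
            have hm : q.1 + a ∈ List.map (fun p => p.1 + a) l := List.mem_map_of_mem hq
            rw [hqt, ← hp] at hm
            exact hnotin hm)]
      simp only [pvB_upd, hp]
      split_ifs with h1
      · cases hg : d.get? t with
        | none => dsimp only; rw [PySem.Dict.get?_insert_self]
        | some cur =>
          dsimp only
          split_ifs with h2
          · rw [PySem.Dict.get?_insert_self]
          · exact hg
      · rfl
    · have hfind : (p :: l).find? (fun q => q.1 + a == t) = l.find? (fun q => q.1 + a == t) := by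
        simp only [List.find?]
        rw [show (p.1 + a == t) = false by simp [hp]]
      rw [hfind, List.foldl_cons, ih (pvB_upd maxT a d p) hnd',
        pvB_upd_get?_ne maxT a d p t hp]

-- keys stay unique through B's construction
theorem pvB_upd_nodup (maxT a : Int) (d : PySem.Dict Int (List Int)) (p : Int × List Int)
    (h : d.keys.Nodup) : (pvB_upd maxT a d p).keys.Nodup := by
  simp only [pvB_upd]
  split_ifs with h1
  · cases hg : d.get? (p.1 + a) with
    | none => exact PySem.Dict.nodup_keys_insert _ _ _ h
    | some cur =>
      dsimp only
      split_ifs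
      · exact PySem.Dict.nodup_keys_insert _ _ _ h
      · exact h
  · exact h

theorem pvB_fold_nodup (maxT a : Int) (l : List (Int × List Int))
    (d : PySem.Dict Int (List Int)) (h : d.keys.Nodup) :
    (l.foldl (pvB_upd maxT a) d).keys.Nodup := by
  induction l generalizing d with
  | nil => exact h
  | cons p l ih => exact ih _ (pvB_upd_nodup maxT a d p h)

theorem pvB_best_nodup (maxT : Int) (nums : List Int) : (pvB_best maxT nums).keys.Nodup := by
  unfold pvB_best
  generalize hd : ((PySem.Dict.empty).insert (0 : Int) ([] : List Int)) = d
  have hnd : d.keys.Nodup := by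
    rw [← hd]
    exact PySem.Dict.nodup_keys_insert _ _ _ PySem.Dict.nodup_keys_empty
  clear hd
  induction nums generalizing d with
  | nil => exact hnd
  | cons a ns ih => exact ih _ (pvB_fold_nodup maxT a d.items d hnd)

-- prefix stability of A's table and backtracking under appending an item
theorem pvA_dp_append (maxT : Int) (ns : List Int) (a : Int) (i : Nat) (h : i ≤ ns.length) :
    pvA_dp maxT (ns ++ [a]) i = pvA_dp maxT ns i := by
  induction i with
  | zero => rfl
  | succ i ih =>
    have hi : i < ns.length := by omega
    simp only [pvA_dp, ih (by omega), List.getD_append _ _ _ _ hi]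

theorem pvA_back_append (maxT : Int) (ns : List Int) (a : Int) (i : Nat) (h : i ≤ ns.length) (t : Int) :
    pvA_back maxT (ns ++ [a]) i t = pvA_back maxT ns i t := by
  induction i generalizing t with
  | zero => rfl
  | succ i ih =>
    have hi : i < ns.length := by omega
    simp only [pvA_back, List.getD_append _ _ _ _ hi,
      pvA_dp_append maxT ns a (i+1) h, pvA_dp_append maxT ns a i (by omega)]
    split_ifs with h1 h2
    · rfl
    · rw [ih (by omega)]
    · rw [ih (by omega)]

-- MAIN INVARIANT: B's dict holds exactly A's reachable sums with A's backtracked subsets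
theorem pvB_best_inv (maxT : Int) (h0 : 0 < maxT) (nums : List Int) (t : Int) :
    (pvB_best maxT nums).get? t =
      if 0 ≤ pvA_dp maxT nums nums.length t then some (pvA_back maxT nums nums.length t) else none := by
  induction nums using List.reverseRecOn generalizing t with
  | nil =>
    simp only [pvB_best, List.foldl_nil, List.length_nil, pvA_dp, pvA_row0, pvA_back]
    by_cases ht : t = 0
    · subst ht
      rw [PySem.Dict.get?_insert_self]
      simp
    · rw [PySem.Dict.get?_insert_of_ne _ _ ht, PySem.Dict.get?_empty]
      rw [if_neg (by simp [ht])]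
  | append_singleton ns a ih =>
    have hfold : pvB_best maxT (ns ++ [a]) =
        (pvB_best maxT ns).items.foldl (pvB_upd maxT a) (pvB_best maxT ns) := by
      simp [pvB_best, List.foldl_append]
    set d := pvB_best maxT ns with hd
    set P := pvA_dp maxT ns ns.length with hP
    have hnd : d.keys.Nodup := pvB_best_nodup maxT ns
    have hndmap : (d.items.map (fun p => p.1 + a)).Nodup := by
      have h1 : (d.items.map (fun p : Int × List Int => p.1)).Nodup := hnd
      have h2 := h1.map (f := fun x => x + a) (add_left_injective a)
      rw [List.map_map] at h2
      exact h2
    have hgetD : (ns ++ [a]).getD ns.length 0 = a := by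
      rw [List.getD_append_right _ _ _ _ le_rfl]
      simp
    have hdpN : pvA_dp maxT (ns ++ [a]) (ns.length + 1) = pvA_step maxT P a := by
      show pvA_step maxT (pvA_dp maxT (ns ++ [a]) ns.length) ((ns ++ [a]).getD ns.length 0) =
        pvA_step maxT P a
      rw [pvA_dp_append maxT ns a ns.length le_rfl, hgetD, hP]
    have hbackN : ∀ u : Int, ¬ u < 0 → pvA_back maxT (ns ++ [a]) (ns.length + 1) u =
        (if a ≤ u ∧ pvA_step maxT P a u = P (u - a) + 1 then
          pvA_back maxT ns ns.length (u - a) ++ [a] else pvA_back maxT ns ns.length u) := by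
      intro u hu
      show (if u < 0 then [] else _) = _
      rw [if_neg hu, hgetD, hdpN, pvA_dp_append maxT ns a ns.length le_rfl, ← hP,
        pvA_back_append maxT ns a ns.length le_rfl, pvA_back_append maxT ns a ns.length le_rfl]
    rw [hfold, pvB_foldl_get? maxT a d.items d t hndmap]
    rw [List.length_append, List.length_cons, List.length_nil, Nat.add_zero, hdpN]
    cases hfind : d.items.find? (fun p => p.1 + a == t) with
    | none =>
      have hnone : P (t - a) < 0 := by
        by_contra hge
        have hge' : 0 ≤ P (t - a) := by omega
        have hsome : d.get? (t - a) = some (pvA_back maxT ns ns.length (t - a)) := by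
          rw [ih (t - a), if_pos hge']
        have hmem := PySem.Dict.mem_items_of_get?_eq_some d hsome
        rw [List.find?_eq_none] at hfind
        exact absurd (by simp) (hfind _ hmem)
      dsimp only
      rw [ih t]
      have hc := pvA_dp_cases maxT ns ns.length t
      have hc' := pvA_dp_cases maxT ns ns.length (t - a)
      rw [← hP] at hc hc'
      have hstep0 : pvA_step maxT P a t =
          if 0 ≤ t ∧ t < maxT then max (-1000000000) (P t) else -1000000000 := by
        simp only [pvA_step]
        split_ifs with h1 h2
        · exact absurd h2.2 (by omega)
        · rfl
        · rfl
      by_cases hr : 0 ≤ t ∧ t < maxT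
      · rw [hstep0, if_pos hr]
        by_cases hPt : 0 ≤ P t
        · rw [if_pos hPt, if_pos (show (0:Int) ≤ max (-1000000000) (P t) by omega),
            hbackN t (by omega)]
          rw [if_neg (by
            rintro ⟨-, hcon⟩
            rw [hstep0, if_pos hr] at hcon
            omega)]
        · rw [if_neg hPt, if_neg (show ¬ (0:Int) ≤ max (-1000000000) (P t) by omega)]
      · rw [hstep0, if_neg hr, if_neg (show ¬ (0:Int) ≤ -1000000000 by omega)]
        have hPt : ¬ 0 ≤ P t := fun hPt =>
          hr (pvA_dp_nonneg_range maxT h0 ns ns.length t (by rw [← hP]; exact hPt))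
        rw [if_neg hPt]
    | some p =>
      have hpt : p.1 + a = t := by
        have := List.find?_some hfind
        simpa using this
      have hpmem : p ∈ d.items := List.mem_of_find?_eq_some hfind
      have hget : d.get? p.1 = some p.2 := PySem.Dict.get?_of_mem_items d hpmem hnd
      have hPge : 0 ≤ P p.1 ∧ p.2 = pvA_back maxT ns ns.length p.1 := by
        have h2 := ih p.1
        rw [hget] at h2
        by_cases hge : 0 ≤ P p.1
        · rw [if_pos hge] at h2
          exact ⟨hge, Option.some.inj h2⟩
        · rw [if_neg hge] at h2
          simp at h2
      obtain ⟨hPge1, hp2⟩ := hPge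
      have hrange := pvA_dp_nonneg_range maxT h0 ns ns.length p.1 (by rw [← hP]; omega)
      have hat : a ≤ t := by omega
      have hta : t - a = p.1 := by omega
      have hlen2 : (p.2.length : Int) = P p.1 := by
        rw [hp2, hP]
        exact pvA_back_length maxT ns ns.length p.1 (by rw [← hP]; omega)
      have hc := pvA_dp_cases maxT ns ns.length t
      rw [← hP] at hc
      dsimp only
      by_cases h1 : 0 ≤ t ∧ t < maxT
      · rw [if_pos h1]
        have hstep : pvA_step maxT P a t =
            max (max (-1000000000) (P t)) (P (t - a) + 1) := by
          simp only [pvA_step, if_pos h1, hta]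
          rw [if_pos (show a ≤ t ∧ 0 ≤ P p.1 from ⟨hat, by omega⟩)]
        have hNpos : 0 ≤ pvA_step maxT P a t := by
          rw [hstep, hta]; omega
        rw [if_pos hNpos, hbackN t (by omega)]
        cases hgt : d.get? t with
        | none =>
          have hPt : P t < 0 := by
            by_contra hge
            have hge' : 0 ≤ P t := by omega
            rw [ih t, if_pos hge'] at hgt
            exact absurd hgt (by simp)
          have hPtB : P t = -1000000000 := by omega
          have htake : pvA_step maxT P a t = P (t - a) + 1 := by
            rw [hstep, hPtB, hta]; omega
          rw [if_pos ⟨hat, htake⟩, hta, ← hp2]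
        | some cur =>
          have hcur : 0 ≤ P t ∧ cur = pvA_back maxT ns ns.length t := by
            have h3 := ih t
            rw [hgt] at h3
            by_cases hge : 0 ≤ P t
            · rw [if_pos hge] at h3
              exact ⟨hge, Option.some.inj h3⟩
            · rw [if_neg hge] at h3
              simp at h3
          obtain ⟨hcur1, hcur2⟩ := hcur
          have hlenc : (cur.length : Int) = P t := by
            rw [hcur2, hP]
            exact pvA_back_length maxT ns ns.length t (by rw [← hP]; omega)
          dsimp only
          by_cases h2 : cur.length ≤ p.2.length + 1
          · rw [if_pos h2]
            have htake : pvA_step maxT P a t = P (t - a) + 1 := by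
              rw [hstep, hta]
              have : P t ≤ P p.1 + 1 := by
                rw [← hlenc, ← hlen2]; omega
              omega
            rw [if_pos ⟨hat, htake⟩, hta, ← hp2]
          · rw [if_neg h2]
            have hkeep : pvA_step maxT P a t = P t ∧ ¬ pvA_step maxT P a t = P (t - a) + 1 := by
              rw [hstep, hta]
              have : P p.1 + 1 < P t := by
                rw [← hlenc, ← hlen2]; omega
              constructor <;> omega
            rw [if_neg (by exact fun hcon => hkeep.2 hcon.2), hcur2]
      · rw [if_neg h1, ih t]
        have hNneg : pvA_step maxT P a t < 0 := by
          simp only [pvA_step, if_neg h1]; omega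
        rw [if_neg (show ¬ (0:Int) ≤ pvA_step maxT P a t by omega)]
        split_ifs with hge
        · have := pvA_dp_nonneg_range maxT h0 ns ns.length t (by rw [← hP]; omega)
          omega
        · rfl

-- the two offset searches agree
theorem pv_search_eq (maxT target : Int)
    (d : PySem.Dict Int (List Int)) (dpn : Int → Int) (backn : Int → List Int)
    (hInv : ∀ t, d.get? t = if 0 ≤ dpn t then some (backn t) else none)
    (fuel : Nat) (offset : Int) :
    (match pvA_search maxT target dpn fuel offset with
      | none => (none, [])
      | some c => (some c, backn c)) = pvB_search maxT target d fuel offset := by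
  induction fuel generalizing offset with
  | zero => rfl
  | succ fuel ih =>
    simp only [pvA_search, pvB_search]
    have hB1 : (if 0 ≤ target - offset then d.get? (target - offset) else none) =
        (if 0 ≤ target - offset ∧ 0 ≤ dpn (target - offset) then
          some (backn (target - offset)) else none) := by
      rw [hInv]
      split_ifs <;> first | rfl | omega
    have hB2 : (if target + offset < maxT then d.get? (target + offset) else none) =
        (if target + offset < maxT ∧ 0 ≤ dpn (target + offset) then
          some (backn (target + offset)) else none) := by
      rw [hInv]
      split_ifs <;> first | rfl | omega
    rw [hB1, hB2]
    by_cases h1 : 0 ≤ target - offset ∧ 0 ≤ dpn (target - offset)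
    · rw [if_pos h1, if_pos h1]
    · rw [if_neg h1, if_neg h1]
      by_cases h2 : target + offset < maxT ∧ 0 ≤ dpn (target + offset)
      · rw [if_pos h2, if_pos h2]
      · rw [if_neg h2, if_neg h2]
        exact ih (offset + 1)

-- ===== VERDICT (by name: the statement is the Claim_ definition above) =====
theorem subset_sum_dp_longest_spec : Claim_equal_subset_sum_dp_longest := by
  intro nums target f _hdom hpre
  obtain ⟨ht, _hnn⟩ := hpre
  unfold Spec_subset_sum_dp_longest subset_sum_dp_longest subset_sum_dp_longest_alt
  dsimp only
  exact pv_search_eq (target + 20) target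
    (pvB_best (target + 20) (if f then nums.filter (fun n => n < target) else nums))
    (pvA_dp (target + 20) (if f then nums.filter (fun n => n < target) else nums)
      (if f then nums.filter (fun n => n < target) else nums).length)
    (pvA_back (target + 20) (if f then nums.filter (fun n => n < target) else nums)
      (if f then nums.filter (fun n => n < target) else nums).length)
    (fun t => pvB_best_inv (target + 20) (by omega) _ t)
    (target + 20).toNat 0
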